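-- pv_equiv track=rewrite | github.com/leskin-in/mipt-bioalgo | hw4/sequence_peptide_leaderboard.py | _cyclospectrum_score
-- ===== SOURCE A (Python) =====
-- def _cyclospectrum_score(peptide: tuple, spectrum: set) -> int:
--     """
--     Calculate the cyclospectrum score for the given peptide
--     """
--     cyclospectrum = set()
--     for cycle_len in range(1, len(peptide)):
--         peptide_extended = peptide + peptide[:(cycle_len - 1)]
--         for cycle_start_pos in range(len(peptide)):
--             cyclospectrum.add(_peptide_mass(peptide_extended[cycle_start_pos:(cycle_start_pos + cycle_len)]))
--
--     cyclospectrum.add(0)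
--     cyclospectrum.add(_peptide_mass(peptide))
--
--     return len(spectrum.intersection(cyclospectrum))
--
-- def _peptide_mass(peptide: tuple):
--     """
--     Calculate peptide mass
--     """
--     return sum(peptide)
-- ===== SOURCE B (Python) =====
-- def _cyclospectrum_score(peptide: tuple, spectrum: set) -> int:
--     """
--     Cyclospectrum score via prefix sums over the doubled peptide:
--     each cyclic subpeptide mass is one subtraction instead of a slice + sum.
--     """
--     n = len(peptide)
--     prefix = [0]
--     acc = 0
--     for x in peptide + peptide:
--         acc += x
--         prefix.append(acc)
--     masses = {0, prefix[n]}
--     for cycle_len in range(1, n):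
--         for start in range(n):
--             masses.add(prefix[start + cycle_len] - prefix[start])
--     return sum(1 for m in spectrum if m in masses)
-- ===== Notes on version B (the rewrite author's own statement) =====
-- stated objective: faster
-- what changed: B precomputes prefix sums of the doubled peptide once, so each cyclic subpeptide mass is a single subtraction instead of A's per-window slice construction and sum.
import Mathlib
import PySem

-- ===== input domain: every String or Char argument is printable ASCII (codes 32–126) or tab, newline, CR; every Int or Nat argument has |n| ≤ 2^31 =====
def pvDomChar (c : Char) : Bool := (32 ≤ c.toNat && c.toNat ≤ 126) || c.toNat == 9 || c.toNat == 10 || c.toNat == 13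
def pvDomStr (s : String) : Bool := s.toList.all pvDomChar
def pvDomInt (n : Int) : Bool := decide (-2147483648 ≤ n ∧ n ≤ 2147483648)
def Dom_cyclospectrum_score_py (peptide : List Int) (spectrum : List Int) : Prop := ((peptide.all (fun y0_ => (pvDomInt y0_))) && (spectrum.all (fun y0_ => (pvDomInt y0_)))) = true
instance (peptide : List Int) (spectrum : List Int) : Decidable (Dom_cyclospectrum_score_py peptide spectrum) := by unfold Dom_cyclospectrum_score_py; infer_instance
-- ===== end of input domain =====

-- B replaces A's per-window slice + sum (O(n^3)) by prefix sums over the doubled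
-- peptide, so each cyclic subpeptide mass is one subtraction (O(n^2)); same result.

-- ===== PORT A =====
def pvPeptideMass (p : List Int) : Int := p.sum

def cyclospectrum_score_py (peptide : List Int) (spectrum : List Int) : Int :=
  let cyclo : PySem.Set Int :=
    (PySem.List.pyRange 1 (peptide.length : Int) 1).foldl (fun c cycle_len =>
      let peptide_extended := peptide ++ PySem.List.slice peptide none (some (cycle_len - 1))
      (PySem.List.pyRange 0 (peptide.length : Int) 1).foldl (fun c2 cycle_start_pos =>
        PySem.Set.add c2 (pvPeptideMass
          (PySem.List.slice peptide_extended (some cycle_start_pos) (some (cycle_start_pos + cycle_len))))) c)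
      PySem.Set.empty
  let cyclo2 := PySem.Set.add (PySem.Set.add cyclo 0) (pvPeptideMass peptide)
  PySem.Set.len (PySem.Set.inter (PySem.Set.ofList spectrum) cyclo2)

-- ===== PORT B =====
def cyclospectrum_score_py_alt (peptide : List Int) (spectrum : List Int) : Int :=
  let n : Int := peptide.length
  let pref := ((peptide ++ peptide).foldl
      (fun (st : List Int × Int) x => (st.1 ++ [st.2 + x], st.2 + x)) ([0], 0)).1
  let masses0 : PySem.Set Int :=
    PySem.Set.add (PySem.Set.add PySem.Set.empty 0) (PySem.List.pyGetD pref n 0)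
  let masses :=
    (PySem.List.pyRange 1 n 1).foldl (fun m cycle_len =>
      (PySem.List.pyRange 0 n 1).foldl (fun m2 start =>
        PySem.Set.add m2 (PySem.List.pyGetD pref (start + cycle_len) 0
          - PySem.List.pyGetD pref start 0)) m) masses0
  (((PySem.Set.ofList spectrum).countP (fun m => PySem.Set.contains masses m) : Nat) : Int)

-- ===== PRECONDITION & SPEC =====
def Spec_cyclospectrum_score_py (peptide : List Int) (spectrum : List Int) (out : Int) : Prop := out = cyclospectrum_score_py_alt peptide spectrum
instance (peptide : List Int) (spectrum : List Int) (out : Int) : Decidable (Spec_cyclospectrum_score_py peptide spectrum out) := by unfold Spec_cyclospectrum_score_py; infer_instance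

-- ===== CLAIM (what is proved, stated in full; the proofs are below) =====
def Claim_equal_cyclospectrum_score_py : Prop := ∀ (peptide : List Int) (spectrum : List Int), Dom_cyclospectrum_score_py peptide spectrum → Spec_cyclospectrum_score_py peptide spectrum (cyclospectrum_score_py peptide spectrum)

-- ===== LEMMAS AND PROOFS =====

/-- Membership in a doubly nested fold of `Set.add`s. -/
lemma pv_mem_foldl_foldl_add (l : List Int) (g : Int → List Int) (f : Int → Int → Int)
    (s : PySem.Set Int) (y : Int) :
    y ∈ l.foldl (fun c a => (g a).foldl (fun c2 b => PySem.Set.add c2 (f a b)) c) s ↔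
      y ∈ s ∨ ∃ a ∈ l, ∃ b ∈ g a, y = f a b := by
  induction l generalizing s with
  | nil => simp
  | cons x xs ih =>
    simp only [List.foldl_cons, ih, PySem.Set.mem_foldl_add]
    constructor
    · rintro ((h | ⟨b, hb, rfl⟩) | ⟨a, ha, b, hb, rfl⟩)
      · exact Or.inl h
      · exact Or.inr ⟨x, by simp, b, hb, rfl⟩
      · exact Or.inr ⟨a, by simp [ha], b, hb, rfl⟩
    · rintro (h | ⟨a, ha, b, hb, rfl⟩)
      · exact Or.inl (Or.inl h)
      · rcases List.mem_cons.mp ha with rfl | ha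
        · exact Or.inl (Or.inr ⟨b, hb, rfl⟩)
        · exact Or.inr ⟨a, ha, b, hb, rfl⟩

/-- The prefix-sum loop of B, characterised. -/
lemma pv_foldl_prefix (ys zs : List Int) (c : Int) :
    ys.foldl (fun (st : List Int × Int) x => (st.1 ++ [st.2 + x], st.2 + x)) (zs, c)
      = (zs ++ (List.range ys.length).map (fun i => c + (ys.take (i + 1)).sum), c + ys.sum) := by
  induction ys generalizing zs c with
  | nil => simp
  | cons x t ih =>
    simp only [List.foldl_cons, ih, List.length_cons, List.range_succ_eq_map, List.map_cons,
      List.map_map, List.take_succ_cons, List.sum_cons]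
    refine Prod.ext ?_ (by simp; ring)
    simp only [List.append_assoc, List.singleton_append]
    congr 1
    congr 1
    · simp
    · apply List.map_congr_left
      intro a _
      simp only [Function.comp_apply]
      ring

/-- B's prefix list is the sums of the takes of the doubled peptide. -/
lemma pv_pref_eq (p : List Int) :
    ((p ++ p).foldl (fun (st : List Int × Int) x => (st.1 ++ [st.2 + x], st.2 + x)) ([0], 0)).1
      = (List.range ((p ++ p).length + 1)).map (fun i => ((p ++ p).take i).sum) := by
  rw [pv_foldl_prefix]
  simp only [List.range_succ_eq_map, List.map_cons, List.map_map]
  simp [Function.comp]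

lemma pv_getD_map_range (m i : Nat) (f : Nat → Int) (hi : i < m) :
    ((List.range m).map f).getD i 0 = f i := by
  rw [List.getD_eq_getElem?_getD]
  simp [hi]

/-- Core identity: the mass of a cyclic window read from A's extended peptide is a
    difference of prefix sums of the doubled peptide. -/
lemma pv_window_sum (p : List Int) (ln sn : Nat) (h1 : 1 ≤ ln) (_hl : ln < p.length)
    (hs : sn < p.length) :
    (((p ++ p.take (ln - 1)).drop sn).take ln).sum
      = ((p ++ p).take (sn + ln)).sum - ((p ++ p).take sn).sum := by
  have hext : p ++ p.take (ln - 1) = (p ++ p).take (p.length + (ln - 1)) := by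
    rw [List.take_append]
    congr 1
    · exact (List.take_of_length_le (by omega)).symm
    · congr 1; omega
  rw [hext, List.drop_take, List.take_take, min_eq_left (by omega)]
  have : (p ++ p).take (sn + ln) = (p ++ p).take sn ++ ((p ++ p).drop sn).take ln :=
    List.take_add
  rw [this, List.sum_append]
  ring

-- ===== VERDICT (by name: the statement is the Claim_ definition above) =====
lemma pv_contains_eq (C M : PySem.Set Int) (h : ∀ y, y ∈ C ↔ y ∈ M) (x : Int) :
    PySem.Set.contains C x = PySem.Set.contains M x := by
  by_cases hx : x ∈ C
  · rw [(PySem.Set.contains_iff C x).mpr hx, ((PySem.Set.contains_iff M x).mpr ((h x).mp hx)).symm]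
  · have hx' : x ∉ M := fun hm => hx ((h x).mpr hm)
    have h1 : PySem.Set.contains C x = false := by
      cases hcx : PySem.Set.contains C x
      · rfl
      · exact absurd ((PySem.Set.contains_iff C x).mp hcx) hx
    have h2 : PySem.Set.contains M x = false := by
      cases hmx : PySem.Set.contains M x
      · rfl
      · exact absurd ((PySem.Set.contains_iff M x).mp hmx) hx'
    rw [h1, h2]

/-- A's window mass equals B's prefix-sum difference, in Int form. -/
lemma pv_fA_eq_fB (peptide : List Int) (l s : Int) (hl1 : 1 ≤ l) (hl2 : l < (peptide.length : Int))
    (hs1 : 0 ≤ s) (hs2 : s < (peptide.length : Int)) :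
    pvPeptideMass (PySem.List.slice
        (peptide ++ PySem.List.slice peptide none (some (l - 1))) (some s) (some (s + l)))
      = PySem.List.pyGetD (((peptide ++ peptide).foldl
            (fun (st : List Int × Int) x => (st.1 ++ [st.2 + x], st.2 + x)) ([0], 0)).1) (s + l) 0
        - PySem.List.pyGetD (((peptide ++ peptide).foldl
            (fun (st : List Int × Int) x => (st.1 ++ [st.2 + x], st.2 + x)) ([0], 0)).1) s 0 := by
  rw [pv_pref_eq, PySem.List.pyGetD_of_nonneg _ _ (by omega : (0:Int) ≤ s + l),
    PySem.List.pyGetD_of_nonneg _ _ hs1,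
    PySem.List.slice_to peptide (by omega : (0:Int) ≤ l - 1),
    PySem.List.slice_toNat _ hs1 (by omega : (0:Int) ≤ s + l)]
  have hlen : (peptide ++ peptide).length = peptide.length + peptide.length := by simp
  rw [pv_getD_map_range _ _ _ (by rw [hlen]; omega),
    pv_getD_map_range _ _ _ (by rw [hlen]; omega)]
  have e1 : (s + l).toNat - s.toNat = l.toNat := by omega
  have e2 : (l - 1).toNat = l.toNat - 1 := by omega
  have e3 : (s + l).toNat = s.toNat + l.toNat := by omega
  rw [e1, e2, e3]
  exact pv_window_sum peptide l.toNat s.toNat (by omega) (by omega) (by omega)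

theorem cyclospectrum_score_py_spec : Claim_equal_cyclospectrum_score_py := by
  intro peptide spectrum _
  unfold Spec_cyclospectrum_score_py cyclospectrum_score_py cyclospectrum_score_py_alt
  simp only [pvPeptideMass]
  set n : Int := (peptide.length : Int) with hn
  set pref := ((peptide ++ peptide).foldl
      (fun (st : List Int × Int) x => (st.1 ++ [st.2 + x], st.2 + x)) ([0], 0)).1 with hprefdef
  -- the two mass sets
  set C : PySem.Set Int := PySem.Set.add (PySem.Set.add
    ((PySem.List.pyRange 1 n 1).foldl (fun c cycle_len =>
      (PySem.List.pyRange 0 n 1).foldl (fun c2 cycle_start_pos =>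
        PySem.Set.add c2 ((PySem.List.slice
          (peptide ++ PySem.List.slice peptide none (some (cycle_len - 1)))
          (some cycle_start_pos) (some (cycle_start_pos + cycle_len))).sum)) c)
      PySem.Set.empty) 0) peptide.sum with hC
  set M : PySem.Set Int :=
    (PySem.List.pyRange 1 n 1).foldl (fun m cycle_len =>
      (PySem.List.pyRange 0 n 1).foldl (fun m2 start =>
        PySem.Set.add m2 (PySem.List.pyGetD pref (start + cycle_len) 0
          - PySem.List.pyGetD pref start 0)) m)
      (PySem.Set.add (PySem.Set.add PySem.Set.empty 0) (PySem.List.pyGetD pref n 0)) with hM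
  -- B's prefix[n] is the whole peptide's mass
  have hprefn : PySem.List.pyGetD pref n 0 = peptide.sum := by
    rw [hprefdef, pv_pref_eq, hn, PySem.List.pyGetD_natCast,
      pv_getD_map_range _ _ _ (by simp)]
    simp
  -- same members
  have hmem : ∀ y, y ∈ C ↔ y ∈ M := by
    intro y
    rw [hC, hM, PySem.Set.mem_add, PySem.Set.mem_add,
      pv_mem_foldl_foldl_add (PySem.List.pyRange 1 n 1) (fun _ => PySem.List.pyRange 0 n 1),
      pv_mem_foldl_foldl_add (PySem.List.pyRange 1 n 1) (fun _ => PySem.List.pyRange 0 n 1),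
      PySem.Set.mem_add, PySem.Set.mem_add, hprefn]
    have hfe : (∃ a ∈ PySem.List.pyRange 1 n 1, ∃ b ∈ PySem.List.pyRange 0 n 1,
        y = (PySem.List.slice (peptide ++ PySem.List.slice peptide none (some (a - 1)))
          (some b) (some (b + a))).sum) ↔
        (∃ a ∈ PySem.List.pyRange 1 n 1, ∃ b ∈ PySem.List.pyRange 0 n 1,
        y = PySem.List.pyGetD pref (b + a) 0 - PySem.List.pyGetD pref b 0) := by
      constructor <;> rintro ⟨l, hlm, s, hsm, rfl⟩ <;> refine ⟨l, hlm, s, hsm, ?_⟩ <;>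
        rw [PySem.List.mem_pyRange_one] at hlm hsm
      · exact pv_fA_eq_fB peptide l s hlm.1 hlm.2 hsm.1 hsm.2
      · exact (pv_fA_eq_fB peptide l s hlm.1 hlm.2 hsm.1 hsm.2).symm
    rw [hfe]
    simp only [PySem.Set.empty, List.not_mem_nil, false_or]
    constructor
    · rintro ((h | h) | h)
      · exact Or.inr h
      · exact Or.inl (Or.inl h)
      · exact Or.inl (Or.inr h)
    · rintro ((h | h) | h)
      · exact Or.inl (Or.inr h)
      · exact Or.inr h
      · exact Or.inl (Or.inl h)
  -- conclude: both sides count spectrum's elements lying in the (equal) mass set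
  rw [PySem.Set.len, PySem.Set.inter, List.countP_eq_length_filter]
  congr 1
  exact congrArg _ (List.filter_congr (fun x _ => pv_contains_eq C M hmem x))
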